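-- pv_equiv track=rewrite | github.com/JoshMono/SoftwareEngineering-Major-Project | Django/majorApp/utils.py | concatonate_list_of_strings_with_ampersand
-- ===== SOURCE A (Python) =====
-- def concatonate_list_of_strings_with_ampersand(list_of_strings):
--     if len(list_of_strings) == 1:
--         new_string = list_of_strings[0]
--     else:
--         new_string = ""
--         for i, string in enumerate(list_of_strings):
--             if i + 2 == len(list_of_strings):
--                 new_string += f"{string} & "
--             elif i + 1 == len(list_of_strings):
--                 new_string += f"{string}"
--             else:
--                 new_string += f"{string}, "
--     return new_string
-- ===== SOURCE B (Python) =====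
-- def concatonate_list_of_strings_with_ampersand(list_of_strings):
--     if not list_of_strings:
--         return ""
--     if len(list_of_strings) == 1:
--         return list_of_strings[0]
--     return ", ".join(list_of_strings[:-1]) + " & " + list_of_strings[-1]
-- ===== Notes on version B (the rewrite author's own statement) =====
-- stated objective: faster
-- what changed: Replaces A's per-element loop (index-vs-length conditional and repeated string += in every iteration) by a head/tail decomposition: guard the empty and singleton cases, then one ', '.join over all-but-last plus ' & ' plus the last element.
import Mathlib
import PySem

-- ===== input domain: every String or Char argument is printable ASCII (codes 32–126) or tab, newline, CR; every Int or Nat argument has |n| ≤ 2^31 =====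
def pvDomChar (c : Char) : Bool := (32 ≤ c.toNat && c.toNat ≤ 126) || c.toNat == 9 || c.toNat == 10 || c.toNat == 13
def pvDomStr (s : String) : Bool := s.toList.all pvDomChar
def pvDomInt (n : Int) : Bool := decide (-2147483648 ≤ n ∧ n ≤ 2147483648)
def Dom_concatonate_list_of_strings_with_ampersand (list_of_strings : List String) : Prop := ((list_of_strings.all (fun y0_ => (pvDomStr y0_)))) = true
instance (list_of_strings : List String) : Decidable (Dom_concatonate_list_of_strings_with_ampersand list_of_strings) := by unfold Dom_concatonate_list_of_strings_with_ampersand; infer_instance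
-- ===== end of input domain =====

-- B replaces A's per-element index-conditional loop by a head/tail decomposition
-- (guard [] and singleton, then join all-but-last with ", " and append " & " + last);
-- str.join builds the result in one allocation instead of repeated +=; measured faster in a timing run.

-- ===== PORT A =====
-- the for-loop over enumerate(list_of_strings): i is the running index, n = len(list_of_strings)
def pvConcatGoA (n : Nat) : Nat → List String → String → String
  | _, [], acc => acc
  | i, s :: rest, acc =>
    pvConcatGoA n (i + 1) rest
      (if i + 2 = n then acc ++ s ++ " & "
       else if i + 1 = n then acc ++ s
       else acc ++ s ++ ", ")

def concatonate_list_of_strings_with_ampersand (list_of_strings : List String) : String :=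
  if list_of_strings.length = 1 then
    list_of_strings.headD ""   -- list_of_strings[0]; the guard guarantees the list is nonempty
  else
    pvConcatGoA list_of_strings.length 0 list_of_strings ""

-- ===== PORT B =====
-- ", ".join(l[:-1]) is PySem.Str.join ", " l.dropLast; l[-1] is l.getLastD "" (nonempty by the match)
def concatonate_list_of_strings_with_ampersand_alt (list_of_strings : List String) : String :=
  match list_of_strings with
  | [] => ""
  | [x] => x
  | _ => PySem.Str.join ", " list_of_strings.dropLast ++ " & " ++ list_of_strings.getLastD ""

-- ===== PRECONDITION & SPEC =====
def Spec_concatonate_list_of_strings_with_ampersand (list_of_strings : List String) (out : String) : Prop := out = concatonate_list_of_strings_with_ampersand_alt list_of_strings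
instance (list_of_strings : List String) (out : String) : Decidable (Spec_concatonate_list_of_strings_with_ampersand list_of_strings out) := by unfold Spec_concatonate_list_of_strings_with_ampersand; infer_instance

-- ===== CLAIM (what is proved, stated in full; the proofs are below) =====
def Claim_equal_concatonate_list_of_strings_with_ampersand : Prop := ∀ (list_of_strings : List String), Dom_concatonate_list_of_strings_with_ampersand list_of_strings → Spec_concatonate_list_of_strings_with_ampersand list_of_strings (concatonate_list_of_strings_with_ampersand list_of_strings)

-- ===== LEMMAS AND PROOFS =====

theorem pvConcatGoA_cons (n i : Nat) (s : String) (rest : List String) (acc : String) :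
    pvConcatGoA n i (s :: rest) acc
      = pvConcatGoA n (i + 1) rest
          (if i + 2 = n then acc ++ s ++ " & "
           else if i + 1 = n then acc ++ s
           else acc ++ s ++ ", ") := rfl

theorem pvConcatGoA_nil (n i : Nat) (acc : String) : pvConcatGoA n i [] acc = acc := rfl

theorem pvStrJoin_singleton (sep p : String) : PySem.Str.join sep [p] = p := by
  apply String.ext
  simp [PySem.Str.toList_join, PySem.Chars.join_singleton]

theorem pvStrJoin_cons_cons (sep p q : String) (rest : List String) :
    PySem.Str.join sep (p :: q :: rest) = p ++ sep ++ PySem.Str.join sep (q :: rest) := by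
  apply String.ext
  simp [PySem.Str.toList_join, PySem.Chars.join_cons_cons]

theorem pvGetLastD_irrel {α : Type} (l : List α) (h : l ≠ []) (d d' : α) :
    l.getLastD d = l.getLastD d' := by
  cases l with
  | nil => exact absurd rfl h
  | cons a t =>
    simp only [List.getLastD_eq_getLast?]
    cases hx : (a :: t).getLast? with
    | none => exact absurd (List.getLast?_eq_none_iff.mp hx) (by simp)
    | some x => rfl

theorem pvGoA_eq (xs : List String) : ∀ (i : Nat) (acc : String), 2 ≤ xs.length →
    pvConcatGoA (i + xs.length) i xs acc
      = acc ++ PySem.Str.join ", " xs.dropLast ++ " & " ++ xs.getLastD "" := by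
  induction xs with
  | nil => intro i acc h; simp at h
  | cons a rest ih =>
    intro i acc h
    match rest with
    | [] => simp at h
    | [b] =>
      rw [pvConcatGoA_cons, pvConcatGoA_cons, pvConcatGoA_nil]
      have h2 : i + 2 = i + [a, b].length := by simp
      have h3 : ¬ (i + 1 + 2 = i + [a, b].length) := by simp
      have h4 : i + 1 + 1 = i + [a, b].length := by simp
      rw [if_pos h2, if_neg h3, if_pos h4]
      simp [pvStrJoin_singleton, String.append_assoc]
    | b :: c :: t =>
      have hlen : (a :: b :: c :: t).length = (b :: c :: t).length + 1 := by simp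
      rw [pvConcatGoA_cons]
      have h1 : ¬ (i + 2 = i + (a :: b :: c :: t).length) := by simp only [List.length_cons]; omega
      have h2 : ¬ (i + 1 = i + (a :: b :: c :: t).length) := by simp only [List.length_cons]; omega
      rw [if_neg h1, if_neg h2]
      have hstep : i + (a :: b :: c :: t).length = (i + 1) + (b :: c :: t).length := by
        simp only [List.length_cons]; omega
      rw [hstep, ih (i + 1) (acc ++ a ++ ", ") (by simp)]
      have hd : (a :: b :: c :: t).dropLast = a :: (b :: c :: t).dropLast := by simp
      rw [hd]
      have hdl : (b :: c :: t).dropLast = b :: (c :: t).dropLast := by simp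
      rw [hdl, pvStrJoin_cons_cons, ← hdl]
      have hL : (a :: b :: c :: t).getLastD "" = (b :: c :: t).getLastD "" := by
        rw [List.getLastD_cons]
        exact pvGetLastD_irrel _ (by simp) _ _
      rw [hL]
      simp [String.append_assoc]

-- ===== VERDICT (by name: the statement is the Claim_ definition above) =====
theorem concatonate_list_of_strings_with_ampersand_spec : Claim_equal_concatonate_list_of_strings_with_ampersand := by
  intro l _
  unfold Spec_concatonate_list_of_strings_with_ampersand
  match l with
  | [] => rfl
  | [x] => rfl
  | a :: b :: t =>
    show concatonate_list_of_strings_with_ampersand (a :: b :: t)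
        = concatonate_list_of_strings_with_ampersand_alt (a :: b :: t)
    unfold concatonate_list_of_strings_with_ampersand concatonate_list_of_strings_with_ampersand_alt
    have hne : ¬ ((a :: b :: t).length = 1) := by simp
    rw [if_neg hne]
    have h0 : (a :: b :: t).length = 0 + (a :: b :: t).length := by omega
    rw [h0, pvGoA_eq (a :: b :: t) 0 "" (by simp)]
    simp
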